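-- pv_equiv track=rewrite | github.com/xlrobotics/preference-based-planning | parser/scltl.py | scltl_next
-- ===== SOURCE A (Python) =====
-- def scltl_next(args):
--     """Parse LTLf Next."""
--     if len(args) == 1:
--         return str(args[0])
--     else:
--         f = str(args[-1])
--         for _ in args[:-1]:
--             f = f"X({f})"
--         return f
-- ===== SOURCE B (Python) =====
-- # B: closed form -- nesting depth is just len(args)-1; string repetition instead of a loop.
-- def scltl_next(args):
--     """Parse LTLf Next."""
--     if len(args) == 1:
--         return str(args[0])
--     k = len(args) - 1
--     return "X(" * k + str(args[-1]) + ")" * k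
-- ===== Notes on version B (the rewrite author's own statement) =====
-- stated objective: faster
-- what changed: Replaces the wrap-in-a-loop over args[:-1] (repeatedly reallocating the growing f-string) by a closed form: the nesting depth is len(args)-1, so B builds 'X('*k + str(args[-1]) + ')'*k with no iteration.
import Mathlib
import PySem

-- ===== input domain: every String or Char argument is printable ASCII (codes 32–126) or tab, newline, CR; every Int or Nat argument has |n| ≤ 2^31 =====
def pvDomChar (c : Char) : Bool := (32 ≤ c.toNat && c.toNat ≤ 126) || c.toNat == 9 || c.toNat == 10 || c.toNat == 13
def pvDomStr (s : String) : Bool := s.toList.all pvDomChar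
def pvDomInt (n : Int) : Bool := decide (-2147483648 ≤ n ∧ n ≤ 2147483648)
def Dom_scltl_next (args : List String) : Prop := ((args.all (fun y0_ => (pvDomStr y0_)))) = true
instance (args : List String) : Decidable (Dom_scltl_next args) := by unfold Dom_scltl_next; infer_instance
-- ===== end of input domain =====

-- B replaces A's wrap-in-a-loop by the closed form "X("*k ++ last ++ ")"*k with k = len(args)-1; return values only.

-- ===== PORT A =====
def scltl_next (args : List String) : String :=
  if args.length == 1 then
    (PySem.List.pyGet? args 0).getD ""
  else
    let f := (PySem.List.pyGet? args (-1)).getD ""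
    (PySem.List.slice args none (some (-1))).foldl (fun f _ => "X(" ++ f ++ ")") f

-- ===== PORT B =====
-- "X(" * k as in Source B
def strRep (s : String) : Nat → String
  | 0 => ""
  | n + 1 => s ++ strRep s n

def scltl_next_alt (args : List String) : String :=
  if args.length == 1 then
    (PySem.List.pyGet? args 0).getD ""
  else
    let k := args.length - 1
    strRep "X(" k ++ (PySem.List.pyGet? args (-1)).getD "" ++ strRep ")" k

-- ===== PRECONDITION & SPEC =====
-- A raises IndexError on empty args (args[-1]); B does the same, so empty input is excluded.
def Pre_scltl_next (args : List String) : Prop := args ≠ []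
instance (args : List String) : Decidable (Pre_scltl_next args) := by unfold Pre_scltl_next; infer_instance
def pvWitness_scltl_next : List String := (["a", "b"])
def Spec_scltl_next (args : List String) (out : String) : Prop := out = scltl_next_alt args
instance (args : List String) (out : String) : Decidable (Spec_scltl_next args out) := by unfold Spec_scltl_next; infer_instance

-- ===== CLAIM (what is proved, stated in full; the proofs are below) =====
def Claim_equal_scltl_next : Prop := ∀ (args : List String), Dom_scltl_next args → Pre_scltl_next args → Spec_scltl_next args (scltl_next args)

-- ===== LEMMAS AND PROOFS =====
theorem strRep_succ_right (s : String) (n : Nat) : strRep s (n + 1) = strRep s n ++ s := by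
  induction n with
  | zero => simp [strRep]
  | succ n ih =>
      rw [show strRep s (n+1+1) = s ++ strRep s (n+1) from rfl, ih, ← String.append_assoc]
      exact congrArg (· ++ s) ((rfl : s ++ strRep s n = strRep s (n+1)).trans ih)

theorem foldl_wrap (l : List String) (f : String) :
    l.foldl (fun f _ => "X(" ++ f ++ ")") f = strRep "X(" l.length ++ f ++ strRep ")" l.length := by
  induction l generalizing f with
  | nil => simp [strRep]
  | cons a l ih =>
      rw [List.foldl_cons, ih, List.length_cons, strRep_succ_right, show strRep ")" (l.length+1) = ")" ++ strRep ")" l.length from rfl]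
      simp [String.append_assoc]

theorem scltl_next_spec : Claim_equal_scltl_next := by
  intro args _ hpre
  unfold Spec_scltl_next scltl_next scltl_next_alt
  by_cases h : args.length = 1
  · simp [h]
  · have hlen : args.length ≠ 1 := h
    simp only [hlen, beq_iff_eq]
    rw [PySem.List.slice_to_neg_one, foldl_wrap, List.length_dropLast]

-- ===== VERDICT (by name: the statement is the Claim_ definition above) =====
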